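-- pv_equiv track=rewrite | github.com/srinathchoul-tech/CreditMind | tools.py | _find_missing_documents
-- ===== SOURCE A (Python) =====
-- from typing import Any
--
-- def _match_uploaded_names(documents: list[dict[str, Any]]) -> set[str]:
--     names = set()
--     for doc in documents:
--         name = str(doc.get("name", "")).lower()
--         required_name = str(doc.get("required_document_name", "")).lower()
--         names.add(name)
--         if required_name:
--             names.add(required_name)
--     return names
--
-- def _find_missing_documents(required_documents: list[str], uploaded_documents: list[dict[str, Any]]) -> list[str]:
--     uploaded_names = _match_uploaded_names(uploaded_documents)
--     missing = []
--     for required in required_documents: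
--         required_key = required.lower()
--         if not any(token in name for name in uploaded_names for token in required_key.split()):
--             missing.append(required)
--     return missing
-- ===== SOURCE B (Python) =====
-- from typing import Any
--
-- def _match_uploaded_names(documents: list[dict[str, Any]]) -> set[str]:
--     names = set()
--     for doc in documents:
--         name = str(doc.get("name", "")).lower()
--         required_name = str(doc.get("required_document_name", "")).lower()
--         names.add(name)
--         if required_name:
--             names.add(required_name)
--     return names
--
-- def _find_missing_documents(required_documents: list[str], uploaded_documents: list[dict[str, Any]]) -> list[str]:
--     # One substring search against a single '\n'-joined blob of all uploaded names:
--     # tokens come from str.split() so they never contain whitespace, hence a token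
--     # can match inside the blob iff it matches inside some individual name.
--     haystack = "\n".join(sorted(_match_uploaded_names(uploaded_documents)))
--     return [required for required in required_documents
--             if not any(token in haystack for token in required.lower().split())]
-- ===== Notes on version B (the rewrite author's own statement) =====
-- stated objective: simpler
-- what changed: A's nested scan (for each required token, substring-test every uploaded name) is replaced by one substring search per token against a single '\n'-joined blob of all uploaded names; the separator is whitespace, so split() tokens can never straddle two names.
import Mathlib
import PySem

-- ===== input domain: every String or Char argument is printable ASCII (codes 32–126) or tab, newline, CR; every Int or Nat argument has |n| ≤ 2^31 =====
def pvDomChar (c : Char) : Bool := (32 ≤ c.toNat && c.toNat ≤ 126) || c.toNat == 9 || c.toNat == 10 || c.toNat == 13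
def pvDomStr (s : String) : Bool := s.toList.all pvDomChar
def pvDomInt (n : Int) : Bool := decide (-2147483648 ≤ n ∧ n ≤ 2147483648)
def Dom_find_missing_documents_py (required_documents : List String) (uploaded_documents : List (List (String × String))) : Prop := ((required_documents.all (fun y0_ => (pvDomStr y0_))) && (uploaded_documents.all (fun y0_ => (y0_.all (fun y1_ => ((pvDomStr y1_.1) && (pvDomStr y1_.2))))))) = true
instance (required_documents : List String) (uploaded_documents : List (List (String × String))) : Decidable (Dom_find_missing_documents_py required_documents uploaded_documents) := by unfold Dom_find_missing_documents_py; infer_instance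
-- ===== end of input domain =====

-- B replaces A's per-uploaded-name inner scan by one substring search in a single
-- '\n'-joined blob of the (sorted) uploaded names; safe because split() tokens never
-- contain whitespace.

-- ===== PORT A =====
-- shared helper: Python _match_uploaded_names (identical in Source A and Source B)
def matchUploadedNames (documents : List (List (String × String))) : PySem.Set String :=
  documents.foldl (fun names doc =>
    let name := PySem.Str.lower (PySem.Dict.getD (PySem.Dict.mk doc) "name" "")
    let required_name := PySem.Str.lower (PySem.Dict.getD (PySem.Dict.mk doc) "required_document_name" "")
    let names1 := PySem.Set.add names name
    if required_name ≠ "" then PySem.Set.add names1 required_name else names1)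
    PySem.Set.empty

def find_missing_documents_py (required_documents : List String) (uploaded_documents : List (List (String × String))) : List String :=
  let uploaded_names := matchUploadedNames uploaded_documents
  required_documents.foldl (fun missing required =>
    let required_key := PySem.Str.lower required
    if !(uploaded_names.any (fun name =>
          (PySem.Str.split₀ required_key).any (fun token => PySem.Str.isIn token name)))
    then missing ++ [required] else missing) []

-- ===== PORT B =====
def find_missing_documents_py_alt (required_documents : List String) (uploaded_documents : List (List (String × String))) : List String :=
  let haystack := PySem.Str.join "\n"
    (PySem.List.sorted (matchUploadedNames uploaded_documents) (fun x => x) false)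
  required_documents.filter (fun required =>
    !((PySem.Str.split₀ (PySem.Str.lower required)).any
        (fun token => PySem.Str.isIn token haystack)))

-- ===== PRECONDITION & SPEC =====
def Spec_find_missing_documents_py (required_documents : List String) (uploaded_documents : List (List (String × String))) (out : List String) : Prop := out = find_missing_documents_py_alt required_documents uploaded_documents
instance (required_documents : List String) (uploaded_documents : List (List (String × String))) (out : List String) : Decidable (Spec_find_missing_documents_py required_documents uploaded_documents out) := by unfold Spec_find_missing_documents_py; infer_instance

-- ===== CLAIM (what is proved, stated in full; the proofs are below) =====
def Claim_equal_find_missing_documents_py : Prop := ∀ (required_documents : List String) (uploaded_documents : List (List (String × String))), Dom_find_missing_documents_py required_documents uploaded_documents → Spec_find_missing_documents_py required_documents uploaded_documents (find_missing_documents_py required_documents uploaded_documents)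

-- ===== LEMMAS AND PROOFS =====

-- every token produced by str.split() is nonempty and free of whitespace characters
theorem split₀_go_spec (rest : List Char) : ∀ (cur : List Char) (acc : List (List Char)),
    (∀ t ∈ acc, t ≠ [] ∧ ∀ c ∈ t, PySem.Chars.isspace c = false) →
    (∀ c ∈ cur, PySem.Chars.isspace c = false) →
    ∀ t ∈ PySem.Chars.split₀.go rest cur acc, t ≠ [] ∧ ∀ c ∈ t, PySem.Chars.isspace c = false := by
  induction rest with
  | nil =>
    intro cur acc hacc hcur t ht
    rw [PySem.Chars.split₀.go] at ht
    by_cases hc : cur.isEmpty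
    · simp [hc] at ht
      exact hacc t ht
    · simp [hc] at ht
      rcases ht with ht | ht
      · exact hacc t ht
      · subst ht
        refine ⟨by simpa [List.isEmpty_iff] using hc, fun c hcmem => hcur c (List.mem_reverse.mp hcmem)⟩
  | cons c rest ih =>
    intro cur acc hacc hcur t ht
    rw [PySem.Chars.split₀.go] at ht
    by_cases hs : PySem.Chars.isspace c
    · by_cases hc : cur.isEmpty
      · simp [hs, hc] at ht
        exact ih [] acc hacc (by simp) t ht
      · simp [hs, hc] at ht
        refine ih [] (cur.reverse :: acc) ?_ (by simp) t ht
        intro u hu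
        rcases List.mem_cons.mp hu with hu | hu
        · subst hu
          exact ⟨by simpa [List.isEmpty_iff] using hc, fun d hd => hcur d (List.mem_reverse.mp hd)⟩
        · exact hacc u hu
    · simp [hs] at ht
      refine ih (c :: cur) acc hacc ?_ t ht
      intro d hd
      rcases List.mem_cons.mp hd with hd | hd
      · subst hd; simpa using hs
      · exact hcur d hd

theorem split₀_spec (s : List Char) (t : List Char) (ht : t ∈ PySem.Chars.split₀ s) :
    t ≠ [] ∧ ∀ c ∈ t, PySem.Chars.isspace c = false :=
  split₀_go_spec s [] [] (by simp) (by simp) t ht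

-- an infix avoiding c cannot straddle the separator c
theorem infix_append_cons_iff {α : Type} (t a b : List α) (c : α) (hc : c ∉ t) :
    t <:+: a ++ c :: b ↔ t <:+: a ∨ t <:+: b := by
  constructor
  · rintro ⟨u, v, h⟩
    by_cases h1 : u.length + t.length ≤ a.length
    · left
      have hpre : u ++ t <+: a := by
        have h2 : u ++ t <+: a ++ c :: b := ⟨v, by simpa [List.append_assoc] using h⟩
        exact List.prefix_of_prefix_length_le h2 (List.prefix_append a (c :: b))
          (by simpa using h1)
      exact List.IsInfix.trans List.infix_append_right hpre.isInfix
    · by_cases h2 : a.length < u.length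
      · right
        have hpre : a ++ [c] <+: u := by
          have hu : u <+: a ++ c :: b := ⟨t ++ v, by simpa [List.append_assoc] using h⟩
          have hac : a ++ [c] <+: a ++ c :: b := by
            refine ⟨b, by simp⟩
          exact List.prefix_of_prefix_length_le hac hu (by simp; omega)
        obtain ⟨u', hu'⟩ := hpre
        subst hu'
        have hb : u' ++ t ++ v = b := by
          have h' := h
          rw [show a ++ c :: b = a ++ [c] ++ b by simp] at h'
          rw [List.append_assoc (a ++ [c]), List.append_assoc (a ++ [c])] at h'
          have := List.append_cancel_left h'
          simpa [List.append_assoc] using this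
        exact ⟨u', v, hb⟩
      · exfalso
        -- u.length ≤ a.length < u.length + t.length : the c lands inside t
        rw [not_le] at h1
        rw [not_lt] at h2
        have hupre : u <+: a := by
          have hu : u <+: a ++ c :: b := ⟨t ++ v, by simpa [List.append_assoc] using h⟩
          exact List.prefix_of_prefix_length_le hu (List.prefix_append a (c :: b)) h2
        obtain ⟨a', ha'⟩ := hupre
        subst ha'
        have htv : t ++ v = a' ++ c :: b := by
          have h' := h
          rw [List.append_assoc u a' (c :: b)] at h'
          rw [List.append_assoc u t v] at h'
          exact List.append_cancel_left h'
        have hlen : a'.length < t.length := by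
          simp only [List.length_append] at h1
          omega
        have hlen2 : a'.length < (t ++ v).length := by
          simp only [List.length_append]; omega
        have h3 : (t ++ v)[a'.length]'hlen2 = c := by
          simp only [htv]
          rw [List.getElem_append_right (Nat.le_refl a'.length)]
          simp
        have h4 : t[a'.length]'hlen = c :=
          (List.getElem_append_left hlen).symm.trans h3
        exact hc (h4 ▸ List.getElem_mem hlen)
  · rintro (ht | ht)
    · exact ht.trans ((a.prefix_append (c :: b)).isInfix)
    · exact ht.trans ⟨a ++ [c], [], by simp⟩

-- 'tok in sep-joined blob' = 'tok in some piece', for a nonempty tok avoiding the separator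
theorem isIn_join_sep (tok : List Char) (c : Char) (hne : tok ≠ []) (hc : c ∉ tok) :
    ∀ l : List (List Char),
      PySem.Chars.isIn tok (PySem.Chars.join [c] l) = l.any (fun n => PySem.Chars.isIn tok n) := by
  intro l
  induction l with
  | nil =>
    rw [PySem.Chars.join_nil]
    simp only [List.any_nil]
    rw [PySem.Chars.isIn_eq_false_iff]
    intro h
    exact hne (List.infix_nil.mp h)
  | cons p l ih =>
    cases l with
    | nil => rw [PySem.Chars.join_singleton]; simp
    | cons q rest =>
      rw [PySem.Chars.join_cons_cons]
      rw [Bool.eq_iff_iff, PySem.Chars.isIn_iff_infix]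
      rw [show p ++ [c] ++ PySem.Chars.join [c] (q :: rest)
            = p ++ c :: PySem.Chars.join [c] (q :: rest) by simp]
      rw [infix_append_cons_iff tok p _ c hc]
      rw [← PySem.Chars.isIn_iff_infix (s := p), ← PySem.Chars.isIn_iff_infix, ih]
      simp

-- swapping the two nested any's
theorem any_any_comm {α β : Type} (l : List α) (m : List β) (p : α → β → Bool) :
    (l.any fun a => m.any (p a)) = m.any fun b => l.any fun a => p a b := by
  rw [Bool.eq_iff_iff]
  simp [List.any_eq_true]
  tauto

theorem any_perm {α : Type} {l m : List α} (h : l.Perm m) (p : α → Bool) :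
    l.any p = m.any p := by
  rw [Bool.eq_iff_iff]
  simp only [List.any_eq_true]
  constructor <;> rintro ⟨x, hx, hpx⟩
  · exact ⟨x, h.mem_iff.mp hx, hpx⟩
  · exact ⟨x, h.mem_iff.mpr hx, hpx⟩

-- the per-required predicate of A equals that of B
theorem pred_eq (names : List String) (key : String) :
    (names.any fun name => (PySem.Str.split₀ key).any fun token => PySem.Str.isIn token name)
      = (PySem.Str.split₀ key).any fun token =>
          PySem.Str.isIn token (PySem.Str.join "\n" (PySem.List.sorted names (fun x => x) false)) := by
  rw [any_any_comm]
  refine PySem.List.any_congr_mem ?_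
  intro token htok
  have htokl : token.toList ∈ PySem.Chars.split₀ key.toList := by
    rw [← PySem.Str.split₀_map_toList]
    exact List.mem_map_of_mem htok
  obtain ⟨hne, hns⟩ := split₀_spec key.toList token.toList htokl
  have hnl : '\n' ∉ token.toList := by
    intro hmem
    have := hns '\n' hmem
    simp [PySem.Chars.isspace] at this
  have hjoin : (PySem.Str.join "\n" (PySem.List.sorted names (fun x => x) false)).toList
      = PySem.Chars.join ['\n'] ((PySem.List.sorted names (fun x => x) false).map String.toList) := by
    simp [PySem.Str.toList_join]
  calc (names.any fun name => PySem.Str.isIn token name)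
      = ((PySem.List.sorted names (fun x => x) false).map String.toList).any
          (fun n => PySem.Chars.isIn token.toList n) := by
        rw [List.any_map]
        refine (any_perm (PySem.List.sorted_perm names (fun x => x) false) _).symm.trans ?_
        refine PySem.List.any_congr_mem ?_
        intro name _
        simp [Function.comp]
    _ = PySem.Chars.isIn token.toList (PySem.Chars.join ['\n']
          ((PySem.List.sorted names (fun x => x) false).map String.toList)) := by
        rw [isIn_join_sep token.toList '\n' hne hnl]
    _ = _ := by rw [← hjoin]; simp

-- ===== VERDICT (by name: the statement is the Claim_ definition above) =====
theorem find_missing_documents_py_spec : Claim_equal_find_missing_documents_py := by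
  intro required_documents uploaded_documents _
  show find_missing_documents_py required_documents uploaded_documents
      = find_missing_documents_py_alt required_documents uploaded_documents
  unfold find_missing_documents_py find_missing_documents_py_alt
  rw [PySem.List.foldl_append_if_eq_filter]
  rw [List.nil_append]
  refine List.filter_congr ?_
  intro required _
  rw [pred_eq]
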